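-- pv_equiv track=rewrite | github.com/SSZX866/leetcode | 动态规划/3.hard/1955. 统计特殊子序列的数目.py | countSpecialSubsequences
-- ===== SOURCE A (Python) =====
-- from typing import List
--
-- def countSpecialSubsequences(nums: List[int]) -> int:
--     MOD = 1000000007
--     dp = [0] * 3
--     if nums[0] == 0: dp[0] = 1
--     for i in range(1, len(nums)):
--         if nums[i] == 0:
--             dp[0] = (dp[0] * 2 + 1) % MOD
--         elif nums[i] == 1:
--             dp[1] = (dp[0] + dp[1] * 2) % MOD
--         else:
--             dp[2] = (dp[1] + dp[2] * 2) % MOD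
--     return dp[2]
-- ===== SOURCE B (Python) =====
-- from typing import List
--
-- def countSpecialSubsequences(nums: List[int]) -> int:
--     MOD = 1000000007
--     # pass 1: run-length encode by category (0, 1, or "2" = anything else)
--     runs = []
--     cur, cnt = None, 0
--     for v in nums:
--         c = 0 if v == 0 else (1 if v == 1 else 2)
--         if c == cur:
--             cnt += 1
--         else:
--             if cnt:
--                 runs.append((cur, cnt))
--             cur, cnt = c, 1
--     if cnt:
--         runs.append((cur, cnt))
--     # pass 2: batch DP, one closed-form update per run via modular exponentiation
--     dp0 = dp1 = dp2 = 0
--     for c, k in runs: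
--         p = pow(2, k, MOD)
--         if c == 0:
--             dp0 = (dp0 * p + p - 1) % MOD
--         elif c == 1:
--             dp1 = (dp1 * p + dp0 * (p - 1)) % MOD
--         else:
--             dp2 = (dp2 * p + dp1 * (p - 1)) % MOD
--     return dp2
-- ===== Notes on version B (the rewrite author's own statement) =====
-- stated objective: alternative
-- what changed: Replaces A's element-by-element 3-counter DP by two passes: run-length encode the list into maximal runs of equal category (0, 1, other), then apply one closed-form batch update per run using modular exponentiation (pow(2,k,MOD)).
import Mathlib
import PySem

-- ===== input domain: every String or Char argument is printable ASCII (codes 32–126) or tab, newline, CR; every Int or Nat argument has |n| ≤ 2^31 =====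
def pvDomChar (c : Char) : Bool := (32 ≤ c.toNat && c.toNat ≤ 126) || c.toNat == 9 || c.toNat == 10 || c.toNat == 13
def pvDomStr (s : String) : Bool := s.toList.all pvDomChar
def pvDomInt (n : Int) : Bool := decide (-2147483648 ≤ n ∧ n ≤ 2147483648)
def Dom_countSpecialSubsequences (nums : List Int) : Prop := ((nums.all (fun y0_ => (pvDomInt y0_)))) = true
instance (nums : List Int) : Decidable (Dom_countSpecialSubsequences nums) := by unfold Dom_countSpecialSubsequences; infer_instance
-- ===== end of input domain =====

-- B replaces A's element-by-element 3-counter DP by run-length encoding plus one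
-- closed-form batch update per run (modular exponentiation); same O(n) cost.

-- ===== PORT A =====
-- one loop step of A: dp-updates on state (dp0, dp1, dp2)
def stepA (s : Int × Int × Int) (v : Int) : Int × Int × Int :=
  if v = 0 then ((s.1 * 2 + 1) % 1000000007, s.2.1, s.2.2)
  else if v = 1 then (s.1, (s.1 + s.2.1 * 2) % 1000000007, s.2.2)
  else (s.1, s.2.1, (s.2.1 + s.2.2 * 2) % 1000000007)

def countSpecialSubsequences (nums : List Int) : Int :=
  match nums with
  | [] => 0          -- Python raises IndexError here; excluded by Pre_
  | x :: rest => (rest.foldl stepA ((if x = 0 then 1 else 0), 0, 0)).2.2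

-- ===== PORT B =====
-- category of an element: 0, 1, or 2 (= anything else)
def pvCat (v : Int) : Int := if v = 0 then 0 else if v = 1 then 1 else 2

-- pass-1 step: state (cur, cnt, runs); Python's `cur` starts as None (Option)
def pvRleStep (s : Option Int × Nat × List (Int × Nat)) (v : Int) :
    Option Int × Nat × List (Int × Nat) :=
  if some (pvCat v) = s.1 then (s.1, s.2.1 + 1, s.2.2)
  else if s.2.1 ≠ 0 then (some (pvCat v), 1, s.2.2 ++ [(s.1.getD 0, s.2.1)])
  else (some (pvCat v), 1, s.2.2)

-- run-length encoding of nums by category (pass 1 of Source B)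
def pvRuns (nums : List Int) : List (Int × Nat) :=
  let s := nums.foldl pvRleStep (none, 0, [])
  if s.2.1 ≠ 0 then s.2.2 ++ [(s.1.getD 0, s.2.1)] else s.2.2

-- pass-2 step: batch update for one run (c, k), p = pow(2, k, MOD)
def pvRunStep (s : Int × Int × Int) (r : Int × Nat) : Int × Int × Int :=
  let p : Int := (2 ^ r.2) % 1000000007
  if r.1 = 0 then ((s.1 * p + p - 1) % 1000000007, s.2.1, s.2.2)
  else if r.1 = 1 then (s.1, (s.2.1 * p + s.1 * (p - 1)) % 1000000007, s.2.2)
  else (s.1, s.2.1, (s.2.2 * p + s.2.1 * (p - 1)) % 1000000007)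

def countSpecialSubsequences_alt (nums : List Int) : Int :=
  ((pvRuns nums).foldl pvRunStep (0, 0, 0)).2.2

-- ===== PRECONDITION & SPEC =====
-- Pre_ excludes only the empty list, on which Python A raises IndexError.
def Pre_countSpecialSubsequences (nums : List Int) : Prop := nums ≠ []
instance (nums : List Int) : Decidable (Pre_countSpecialSubsequences nums) := by
  unfold Pre_countSpecialSubsequences; infer_instance

def pvWitness_countSpecialSubsequences : List Int := [0, 1, 2]

def Spec_countSpecialSubsequences (nums : List Int) (out : Int) : Prop :=
  out = countSpecialSubsequences_alt nums
instance (nums : List Int) (out : Int) : Decidable (Spec_countSpecialSubsequences nums out) := by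
  unfold Spec_countSpecialSubsequences; infer_instance

-- ===== CLAIM (what is proved, stated in full; the proofs are below) =====
def Claim_equal_countSpecialSubsequences : Prop :=
  ∀ (nums : List Int), Dom_countSpecialSubsequences nums →
    Pre_countSpecialSubsequences nums →
    Spec_countSpecialSubsequences nums (countSpecialSubsequences nums)

-- ===== LEMMAS AND PROOFS =====

-- A's loop step without the modular reduction
def pstepA (s : Int × Int × Int) (v : Int) : Int × Int × Int :=
  if v = 0 then (s.1 * 2 + 1, s.2.1, s.2.2)
  else if v = 1 then (s.1, s.1 + s.2.1 * 2, s.2.2)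
  else (s.1, s.2.1, s.2.1 + s.2.2 * 2)

-- B's run step without the modular reduction
def pRun (s : Int × Int × Int) (r : Int × Nat) : Int × Int × Int :=
  let p : Int := 2 ^ r.2
  if r.1 = 0 then (s.1 * p + p - 1, s.2.1, s.2.2)
  else if r.1 = 1 then (s.1, s.2.1 * p + s.1 * (p - 1), s.2.2)
  else (s.1, s.2.1, s.2.2 * p + s.2.1 * (p - 1))

-- A's reduced loop equals the un-reduced loop followed by reduction
lemma modA (l : List Int) : ∀ a b c : Int,
    l.foldl stepA (a % 1000000007, b % 1000000007, c % 1000000007) =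
      ((l.foldl pstepA (a, b, c)).1 % 1000000007,
       (l.foldl pstepA (a, b, c)).2.1 % 1000000007,
       (l.foldl pstepA (a, b, c)).2.2 % 1000000007) := by
  induction l with
  | nil => intro a b c; simp
  | cons x l ih =>
    intro a b c
    simp only [List.foldl_cons, stepA, pstepA]
    split_ifs
    · have h : (a % 1000000007 * 2 + 1) % 1000000007 = (a * 2 + 1) % 1000000007 := by omega
      rw [h]; exact ih (a * 2 + 1) b c
    · have h : (a % 1000000007 + b % 1000000007 * 2) % 1000000007
          = (a + b * 2) % 1000000007 := by omega
      rw [h]; exact ih a (a + b * 2) c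
    · have h : (b % 1000000007 + c % 1000000007 * 2) % 1000000007
          = (b + c * 2) % 1000000007 := by omega
      rw [h]; exact ih a b (b + c * 2)

lemma emod_self_modEq (a : Int) : a % 1000000007 ≡ a [ZMOD 1000000007] :=
  Int.emod_emod_of_dvd a dvd_rfl

-- B's reduced run loop equals the un-reduced run loop followed by reduction
lemma modR (rs : List (Int × Nat)) : ∀ a b c : Int,
    rs.foldl pvRunStep (a % 1000000007, b % 1000000007, c % 1000000007) =
      ((rs.foldl pRun (a, b, c)).1 % 1000000007,
       (rs.foldl pRun (a, b, c)).2.1 % 1000000007,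
       (rs.foldl pRun (a, b, c)).2.2 % 1000000007) := by
  induction rs with
  | nil => intro a b c; simp
  | cons r rs ih =>
    intro a b c
    have hp := emod_self_modEq ((2 : Int) ^ r.2)
    simp only [List.foldl_cons, pvRunStep, pRun]
    split_ifs
    · have h : (a % 1000000007 * (2 ^ r.2 % 1000000007) + 2 ^ r.2 % 1000000007 - 1)
          % 1000000007 = (a * 2 ^ r.2 + 2 ^ r.2 - 1) % 1000000007 :=
        (((emod_self_modEq a).mul hp).add hp).sub (Int.ModEq.refl 1)
      rw [h]; exact ih (a * 2 ^ r.2 + 2 ^ r.2 - 1) b c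
    · have h : (b % 1000000007 * (2 ^ r.2 % 1000000007)
            + a % 1000000007 * (2 ^ r.2 % 1000000007 - 1)) % 1000000007
          = (b * 2 ^ r.2 + a * (2 ^ r.2 - 1)) % 1000000007 :=
        ((emod_self_modEq b).mul hp).add
          ((emod_self_modEq a).mul (hp.sub (Int.ModEq.refl 1)))
      rw [h]; exact ih a (b * 2 ^ r.2 + a * (2 ^ r.2 - 1)) c
    · have h : (c % 1000000007 * (2 ^ r.2 % 1000000007)
            + b % 1000000007 * (2 ^ r.2 % 1000000007 - 1)) % 1000000007
          = (c * 2 ^ r.2 + b * (2 ^ r.2 - 1)) % 1000000007 :=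
        ((emod_self_modEq c).mul hp).add
          ((emod_self_modEq b).mul (hp.sub (Int.ModEq.refl 1)))
      rw [h]; exact ih a b (c * 2 ^ r.2 + b * (2 ^ r.2 - 1))

-- a run of length 1 is one un-reduced A-step
lemma pRun_one (s : Int × Int × Int) (v : Int) : pRun s (pvCat v, 1) = pstepA s v := by
  by_cases h0 : v = 0
  · norm_num [pRun, pvCat, pstepA, h0, Prod.ext_iff]
    omega
  · by_cases h1 : v = 1
    · norm_num [pRun, pvCat, pstepA, h0, h1, Prod.ext_iff]
      omega
    · norm_num [pRun, pvCat, pstepA, h0, h1, Prod.ext_iff]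
      omega

-- extending a run by one element is one more un-reduced A-step
lemma pRun_extend (s : Int × Int × Int) (v : Int) (c : Int) (k : Nat)
    (hc : pvCat v = c) : pRun s (c, k + 1) = pstepA (pRun s (c, k)) v := by
  subst hc
  by_cases h0 : v = 0
  · norm_num [pRun, pvCat, pstepA, h0, Prod.ext_iff, pow_succ]
    ring
  · by_cases h1 : v = 1
    · norm_num [pRun, pvCat, pstepA, h0, h1, Prod.ext_iff, pow_succ]
      ring
    · norm_num [pRun, pvCat, pstepA, h0, h1, Prod.ext_iff, pow_succ]
      ring

-- the pass-1 fold from a pending run (cur, cnt), finished and fed to the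
-- un-reduced run DP, equals the un-reduced element DP over the remaining list
lemma rle_dp (l : List Int) : ∀ (cur : Int) (cnt : Nat) (runs : List (Int × Nat))
    (s : Int × Int × Int), cnt ≠ 0 →
    (let st := l.foldl pvRleStep (some cur, cnt, runs)
     (if st.2.1 ≠ 0 then st.2.2 ++ [(st.1.getD 0, st.2.1)] else st.2.2)).foldl pRun s
      = l.foldl pstepA ((runs ++ [(cur, cnt)]).foldl pRun s) := by
  induction l with
  | nil =>
    intro cur cnt runs s hcnt
    simp [hcnt]
  | cons v l ih =>
    intro cur cnt runs s hcnt
    simp only [List.foldl_cons]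
    by_cases hm : some (pvCat v) = (some cur : Option Int)
    · have hc : pvCat v = cur := by simpa using hm
      rw [show pvRleStep (some cur, cnt, runs) v = (some cur, cnt + 1, runs) by
        simp [pvRleStep, hm]]
      rw [ih cur (cnt + 1) runs s (by omega)]
      congr 1
      simp only [List.foldl_append, List.foldl_cons, List.foldl_nil]
      rw [pRun_extend _ v cur cnt hc]
    · rw [show pvRleStep (some cur, cnt, runs) v
          = (some (pvCat v), 1, runs ++ [(cur, cnt)]) by
        simp [pvRleStep, hm, hcnt]]
      rw [ih (pvCat v) 1 (runs ++ [(cur, cnt)]) s one_ne_zero]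
      congr 1
      simp only [List.foldl_append, List.foldl_cons, List.foldl_nil]
      rw [pRun_one]

-- pass 1 + un-reduced run DP over the whole list = un-reduced element DP
lemma runs_pRun_eq (nums : List Int) (s : Int × Int × Int) :
    (pvRuns nums).foldl pRun s = nums.foldl pstepA s := by
  cases nums with
  | nil => simp [pvRuns]
  | cons v l =>
    have hstep : pvRleStep (none, 0, []) v = (some (pvCat v), 1, []) := by
      simp [pvRleStep]
    have := rle_dp l (pvCat v) 1 [] s one_ne_zero
    simp only at this
    unfold pvRuns
    simp only [List.foldl_cons, hstep, this, List.foldl_append, List.foldl_cons,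
      List.foldl_nil, pRun_one]

lemma altB_eq (nums : List Int) :
    countSpecialSubsequences_alt nums
      = (nums.foldl pstepA (0, 0, 0)).2.2 % 1000000007 := by
  unfold countSpecialSubsequences_alt
  conv_lhs => rw [show ((0 : Int), (0 : Int), (0 : Int))
      = ((0 : Int) % 1000000007, (0 : Int) % 1000000007, (0 : Int) % 1000000007) by
    norm_num]
  rw [modR, runs_pRun_eq]

lemma portA_eq (nums : List Int) (h : nums ≠ []) :
    countSpecialSubsequences nums
      = (nums.foldl pstepA (0, 0, 0)).2.2 % 1000000007 := by
  rcases nums with _ | ⟨x, rest⟩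
  · exact absurd rfl h
  · show (List.foldl stepA ((if x = 0 then (1 : Int) else 0), 0, 0) rest).2.2 = _
    have hinit : ((if x = 0 then (1 : Int) else 0), (0 : Int), (0 : Int))
        = ((if x = 0 then (1 : Int) else 0) % 1000000007, (0 : Int) % 1000000007,
            (0 : Int) % 1000000007) := by
      split_ifs <;> norm_num
    have hfirst : pstepA (0, 0, 0) x = ((if x = 0 then (1 : Int) else 0), 0, 0) := by
      simp only [pstepA]
      split_ifs <;> norm_num
    rw [hinit, modA rest (if x = 0 then 1 else 0) 0 0]
    simp only [List.foldl_cons, hfirst]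

-- ===== VERDICT (by name: the statement is the Claim_ definition above) =====
theorem countSpecialSubsequences_spec : Claim_equal_countSpecialSubsequences := by
  intro nums _ hpre
  unfold Spec_countSpecialSubsequences
  rw [portA_eq nums hpre, altB_eq nums]
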